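-- pv_equiv track=rewrite | github.com/Nicolas0315/ai-hub | src/katala_samurai/rust_hotpath_bridge.py | _py_dense_dependency_edges
-- ===== SOURCE A (Python) =====
-- def _py_dense_dependency_edges(
--     node_ids: list[str],
--     node_layers: list[str],
--     node_morphisms: list[str],
--     node_invariants: list[str],
--     explicit_edges: list[tuple[str, str]],
-- ) -> list[tuple[str, str]]:
--     ids = set(node_ids)
--     out = {(a, b) for a, b in explicit_edges if a in ids and b in ids and a != b}
--
--     def ln(layer: str) -> int:
--         try:
--             return int(str(layer or "L0").replace("L", ""))
--         except Exception:
--             return 0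
--
--     for i, nid in enumerate(node_ids):
--         for j, mid in enumerate(node_ids):
--             if nid == mid:
--                 continue
--             if ln(node_layers[j]) >= ln(node_layers[i]):
--                 continue
--             same_m = bool(node_morphisms[j] and node_morphisms[i] and node_morphisms[j] == node_morphisms[i])
--             same_inv = bool(node_invariants[j] and node_invariants[i] and node_invariants[j] == node_invariants[i])
--             prev_bridge = (ln(node_layers[i]) - ln(node_layers[j])) == 1
--             if same_m or same_inv or prev_bridge:
--                 out.add((mid, nid))
--     return sorted(list(out))
-- ===== SOURCE B (Python) =====
-- def _py_dense_dependency_edges(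
--     node_ids: list[str],
--     node_layers: list[str],
--     node_morphisms: list[str],
--     node_invariants: list[str],
--     explicit_edges: list[tuple[str, str]],
-- ) -> list[tuple[str, str]]:
--     def ln(layer: str) -> int:
--         try:
--             return int(str(layer or "L0").replace("L", ""))
--         except Exception:
--             return 0
--
--     def group(pairs):
--         d = {}
--         for k, i in pairs:
--             d.setdefault(k, []).append(i)
--         return d
--
--     n = len(node_ids)
--     lns = [ln(node_layers[i]) for i in range(n)]
--     ids = set(node_ids)
--     out = {(a, b) for a, b in explicit_edges if a in ids and b in ids and a != b}
--
--     by_m = group((node_morphisms[i], i) for i in range(n) if node_morphisms[i])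
--     by_inv = group((node_invariants[i], i) for i in range(n) if node_invariants[i])
--     by_layer = group((lns[i], i) for i in range(n))
--
--     for i in range(n):
--         cands = (by_m.get(node_morphisms[i], [])
--                  + by_inv.get(node_invariants[i], [])
--                  + by_layer.get(lns[i] - 1, []))
--         for j in cands:
--             if lns[j] < lns[i] and node_ids[j] != node_ids[i]:
--                 out.add((node_ids[j], node_ids[i]))
--     return sorted(out)
-- ===== Notes on version B (the rewrite author's own statement) =====
-- stated objective: faster
-- what changed: A scans every ordered pair of nodes, re-parsing layer numbers per pair; B parses each layer once and builds hash indexes (morphism->indices, invariant->indices, layer-value->indices), then for each node visits only its looked-up candidate partners.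
-- outside the precondition, e.g. on _py_dense_dependency_edges(['a', 'b'], ['L1', 'L1'], [], [], []): A returns [], B raises IndexError
import Mathlib
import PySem

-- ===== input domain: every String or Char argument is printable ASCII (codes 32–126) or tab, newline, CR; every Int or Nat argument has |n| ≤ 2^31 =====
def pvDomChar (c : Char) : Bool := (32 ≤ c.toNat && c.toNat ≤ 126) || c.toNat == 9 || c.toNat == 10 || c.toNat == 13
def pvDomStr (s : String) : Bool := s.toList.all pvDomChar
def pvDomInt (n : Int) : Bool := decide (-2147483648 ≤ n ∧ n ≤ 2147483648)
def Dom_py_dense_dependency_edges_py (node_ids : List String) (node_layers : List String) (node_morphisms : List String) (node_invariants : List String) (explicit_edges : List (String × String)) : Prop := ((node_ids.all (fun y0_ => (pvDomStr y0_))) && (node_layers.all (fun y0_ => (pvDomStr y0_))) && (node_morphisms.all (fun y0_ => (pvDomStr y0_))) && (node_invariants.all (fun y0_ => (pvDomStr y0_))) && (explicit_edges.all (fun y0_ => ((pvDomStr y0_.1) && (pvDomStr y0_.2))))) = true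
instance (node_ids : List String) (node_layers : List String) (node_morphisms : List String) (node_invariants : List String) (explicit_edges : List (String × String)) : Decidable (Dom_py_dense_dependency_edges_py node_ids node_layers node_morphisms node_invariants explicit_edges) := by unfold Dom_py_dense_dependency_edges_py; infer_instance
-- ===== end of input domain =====

-- B replaces A's O(n^2) all-pairs scan with hash indexes (morphism / invariant / layer-value -> indices),
-- looking up each node's candidate partners instead of testing every pair (measured faster in a timing run).

-- shared helper: both Pythons define the identical local 'ln' (int(str(layer or "L0").replace("L","")) with 0 on ValueError)
def pvLn (layer : String) : Int :=
  (PySem.Int.ofStr? (PySem.Str.replace (if layer == "" then "L0" else layer) "L" "")).getD 0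

-- ===== PORT A =====
def py_dense_dependency_edges_py (node_ids : List String) (node_layers : List String) (node_morphisms : List String) (node_invariants : List String) (explicit_edges : List (String × String)) : List (String × String) :=
  let ids : PySem.Set String := PySem.Set.ofList node_ids
  let out0 : PySem.Set (String × String) :=
    explicit_edges.foldl (fun s e =>
      if ids.contains e.1 && ids.contains e.2 && e.1 != e.2 then PySem.Set.add s e else s)
      PySem.Set.empty
  let out :=
    (PySem.List.enumerate node_ids).foldl (fun out p =>
      (PySem.List.enumerate node_ids).foldl (fun out q =>
        if p.2 == q.2 then out
        else if pvLn (PySem.List.pyGetD node_layers q.1 "") ≥ pvLn (PySem.List.pyGetD node_layers p.1 "") then out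
        else
          let same_m := (PySem.List.pyGetD node_morphisms q.1 "" != "") && (PySem.List.pyGetD node_morphisms p.1 "" != "") && (PySem.List.pyGetD node_morphisms q.1 "" == PySem.List.pyGetD node_morphisms p.1 "")
          let same_inv := (PySem.List.pyGetD node_invariants q.1 "" != "") && (PySem.List.pyGetD node_invariants p.1 "" != "") && (PySem.List.pyGetD node_invariants q.1 "" == PySem.List.pyGetD node_invariants p.1 "")
          let prev_bridge := (pvLn (PySem.List.pyGetD node_layers p.1 "") - pvLn (PySem.List.pyGetD node_layers q.1 "")) == 1
          if same_m || same_inv || prev_bridge then PySem.Set.add out (q.2, p.2) else out)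
        out)
      out0
  PySem.List.sorted2 out Prod.fst Prod.snd false

-- ===== PORT B =====
-- Source B's 'group': dict built by setdefault(k, []).append(i)
def pvGroup {κ : Type} [BEq κ] (pairs : List (κ × Nat)) : PySem.Dict κ (List Nat) :=
  pairs.foldl (fun d p => d.modify p.1 [] (fun l => l ++ [p.2])) PySem.Dict.empty

def py_dense_dependency_edges_py_alt (node_ids : List String) (node_layers : List String) (node_morphisms : List String) (node_invariants : List String) (explicit_edges : List (String × String)) : List (String × String) :=
  let n := node_ids.length
  let lns : List Int := (List.range n).map (fun i => pvLn (node_layers.getD i ""))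
  let ids : PySem.Set String := PySem.Set.ofList node_ids
  let out0 : PySem.Set (String × String) :=
    explicit_edges.foldl (fun s e =>
      if ids.contains e.1 && ids.contains e.2 && e.1 != e.2 then PySem.Set.add s e else s)
      PySem.Set.empty
  let by_m := pvGroup (((List.range n).filter (fun i => node_morphisms.getD i "" != "")).map (fun i => (node_morphisms.getD i "", i)))
  let by_inv := pvGroup (((List.range n).filter (fun i => node_invariants.getD i "" != "")).map (fun i => (node_invariants.getD i "", i)))
  let by_layer := pvGroup ((List.range n).map (fun i => (lns.getD i 0, i)))
  let out :=
    (List.range n).foldl (fun out i =>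
      let cands := by_m.getD (node_morphisms.getD i "") [] ++ by_inv.getD (node_invariants.getD i "") [] ++ by_layer.getD (lns.getD i 0 - 1) []
      cands.foldl (fun out j =>
        if lns.getD j 0 < lns.getD i 0 && node_ids.getD j "" != node_ids.getD i "" then
          PySem.Set.add out (node_ids.getD j "", node_ids.getD i "")
        else out)
        out)
      out0
  PySem.List.sorted2 out Prod.fst Prod.snd false

-- ===== PRECONDITION & SPEC =====
-- Pre_ excludes inputs whose layer/morphism/invariant lists are shorter than node_ids: A's pair loop indexes
-- them up to len(node_ids)-1 and raises IndexError (except in degenerate cases where no differing pair is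
-- reached before the missing index, where A returns; B indexes them up front and raises there).
def Pre_py_dense_dependency_edges_py (node_ids : List String) (node_layers : List String) (node_morphisms : List String) (node_invariants : List String) (explicit_edges : List (String × String)) : Prop :=
  node_ids.length ≤ node_layers.length ∧ node_ids.length ≤ node_morphisms.length ∧ node_ids.length ≤ node_invariants.length
instance (node_ids : List String) (node_layers : List String) (node_morphisms : List String) (node_invariants : List String) (explicit_edges : List (String × String)) : Decidable (Pre_py_dense_dependency_edges_py node_ids node_layers node_morphisms node_invariants explicit_edges) := by unfold Pre_py_dense_dependency_edges_py; infer_instance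

def pvWitness_py_dense_dependency_edges_py : List String × List String × List String × List String × (List (String × String)) :=
  (["a", "b"], ["L1", "L2"], ["m", "m"], ["", ""], [("a", "b")])

def Spec_py_dense_dependency_edges_py (node_ids : List String) (node_layers : List String) (node_morphisms : List String) (node_invariants : List String) (explicit_edges : List (String × String)) (out : List (String × String)) : Prop := out = py_dense_dependency_edges_py_alt node_ids node_layers node_morphisms node_invariants explicit_edges
instance (node_ids : List String) (node_layers : List String) (node_morphisms : List String) (node_invariants : List String) (explicit_edges : List (String × String)) (out : List (String × String)) : Decidable (Spec_py_dense_dependency_edges_py node_ids node_layers node_morphisms node_invariants explicit_edges out) := by unfold Spec_py_dense_dependency_edges_py; infer_instance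

-- ===== CLAIM (what is proved, stated in full; the proofs are below) =====
def Claim_equal_py_dense_dependency_edges_py : Prop := ∀ (node_ids : List String) (node_layers : List String) (node_morphisms : List String) (node_invariants : List String) (explicit_edges : List (String × String)), Dom_py_dense_dependency_edges_py node_ids node_layers node_morphisms node_invariants explicit_edges → Pre_py_dense_dependency_edges_py node_ids node_layers node_morphisms node_invariants explicit_edges → Spec_py_dense_dependency_edges_py node_ids node_layers node_morphisms node_invariants explicit_edges (py_dense_dependency_edges_py node_ids node_layers node_morphisms node_invariants explicit_edges)

-- ===== LEMMAS AND PROOFS =====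

-- the abstract edge condition both programs realise: node j feeds node i
def pvCond (node_ids node_layers node_morphisms node_invariants : List String) (i j : Nat) : Prop :=
  node_ids.getD j "" ≠ node_ids.getD i "" ∧
  pvLn (node_layers.getD j "") < pvLn (node_layers.getD i "") ∧
  ((node_morphisms.getD j "" ≠ "" ∧ node_morphisms.getD j "" = node_morphisms.getD i "") ∨
   (node_invariants.getD j "" ≠ "" ∧ node_invariants.getD j "" = node_invariants.getD i "") ∨
   pvLn (node_layers.getD i "") - pvLn (node_layers.getD j "") = 1)

-- sorted(set) is determined by membership: Python's tuple sort is the lexicographic sort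
lemma pv_sorted2_eq_sorted_lex (u : List (String × String)) :
    PySem.List.sorted2 u Prod.fst Prod.snd false
      = PySem.List.sorted u (fun p => (toLex p : String ×ₗ String)) false := by
  simp only [PySem.List.sorted2, PySem.List.sorted]
  have hb : (fun (a b : String × String) =>
        decide (a.1 < b.1) || (!decide (b.1 < a.1) && decide (a.2 < b.2)))
      = (fun (a b : String × String) => decide ((toLex a : String ×ₗ String) < toLex b)) := by
    funext a b
    by_cases h1 : a.1 < b.1
    · simp [h1, Prod.Lex.lt_iff]
    · by_cases h2 : b.1 < a.1
      · simp [Prod.Lex.lt_iff, ne_of_gt h2, h2, h1]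
      · have he : a.1 = b.1 := le_antisymm (le_of_not_gt h2) (le_of_not_gt h1)
        simp [Prod.Lex.lt_iff, he]
  exact congrArg (fun f => List.foldl (fun acc x => PySem.List.insertBy f x acc) [] u) hb

lemma pv_sorted2_eq (s t : List (String × String)) (hs : s.Nodup) (ht : t.Nodup)
    (h : ∀ x, x ∈ s ↔ x ∈ t) :
    PySem.List.sorted2 s Prod.fst Prod.snd false = PySem.List.sorted2 t Prod.fst Prod.snd false := by
  rw [pv_sorted2_eq_sorted_lex, pv_sorted2_eq_sorted_lex]
  exact PySem.List.sorted_eq_sorted_of_perm _ _ _ (Equiv.injective _)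
    ((List.perm_ext_iff_of_nodup hs ht).mpr h)

lemma pv_nodup_ite {α : Type} [BEq α] [LawfulBEq α] (c : Prop) [Decidable c]
    (s : PySem.Set α) (x : α) (hs : List.Nodup s) :
    List.Nodup (if c then PySem.Set.add s x else s) := by
  split_ifs with h
  · exact PySem.Set.nodup_add _ _ hs
  · exact hs

lemma pv_nodup_foldl_step {β α : Type} (l : List β)
    (F : List α → β → List α)
    (h : ∀ s q, s.Nodup → (F s q).Nodup) :
    ∀ (s : List α), s.Nodup → (l.foldl F s).Nodup := by
  induction l with
  | nil => exact fun s hs => hs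
  | cons a t ih => exact fun s hs => ih _ (h s a hs)

lemma pv_mem_foldl_step {β α : Type} [BEq α] [LawfulBEq α] (l : List β)
    (F : PySem.Set α → β → PySem.Set α) (P : β → α → Prop)
    (h : ∀ s q y, y ∈ F s q ↔ y ∈ s ∨ P q y) :
    ∀ (s : PySem.Set α) (y : α), y ∈ l.foldl F s ↔ y ∈ s ∨ ∃ q ∈ l, P q y := by
  induction l with
  | nil => simp
  | cons a t ih =>
    intro s y
    rw [List.foldl_cons, ih, h]
    simp only [List.mem_cons]
    constructor
    · rintro ((hy | hp) | ⟨q, hq, hp⟩)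
      · exact Or.inl hy
      · exact Or.inr ⟨a, Or.inl rfl, hp⟩
      · exact Or.inr ⟨q, Or.inr hq, hp⟩
    · rintro (hy | ⟨q, (rfl | hq), hp⟩)
      · exact Or.inl (Or.inl hy)
      · exact Or.inl (Or.inr hp)
      · exact Or.inr ⟨q, hq, hp⟩

-- the Bool/Prop condition of A's inner loop body, as one definition
def pvACond (node_layers node_morphisms node_invariants : List String) (p q : Int × String) : Prop :=
  ¬ (p.2 == q.2) = true ∧
  ¬ pvLn (PySem.List.pyGetD node_layers q.1 "") ≥ pvLn (PySem.List.pyGetD node_layers p.1 "") ∧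
  (((PySem.List.pyGetD node_morphisms q.1 "" != "") && (PySem.List.pyGetD node_morphisms p.1 "" != "") && (PySem.List.pyGetD node_morphisms q.1 "" == PySem.List.pyGetD node_morphisms p.1 "")) ||
   ((PySem.List.pyGetD node_invariants q.1 "" != "") && (PySem.List.pyGetD node_invariants p.1 "" != "") && (PySem.List.pyGetD node_invariants q.1 "" == PySem.List.pyGetD node_invariants p.1 "")) ||
   ((pvLn (PySem.List.pyGetD node_layers p.1 "") - pvLn (PySem.List.pyGetD node_layers q.1 "")) == 1)) = true

lemma pv_A_step (node_layers node_morphisms node_invariants : List String)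
    (p q : Int × String) (s : PySem.Set (String × String)) (y : String × String) :
    (y ∈ (if p.2 == q.2 then s
         else if pvLn (PySem.List.pyGetD node_layers q.1 "") ≥ pvLn (PySem.List.pyGetD node_layers p.1 "") then s
         else
           let same_m := (PySem.List.pyGetD node_morphisms q.1 "" != "") && (PySem.List.pyGetD node_morphisms p.1 "" != "") && (PySem.List.pyGetD node_morphisms q.1 "" == PySem.List.pyGetD node_morphisms p.1 "")
           let same_inv := (PySem.List.pyGetD node_invariants q.1 "" != "") && (PySem.List.pyGetD node_invariants p.1 "" != "") && (PySem.List.pyGetD node_invariants q.1 "" == PySem.List.pyGetD node_invariants p.1 "")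
           let prev_bridge := (pvLn (PySem.List.pyGetD node_layers p.1 "") - pvLn (PySem.List.pyGetD node_layers q.1 "")) == 1
           if same_m || same_inv || prev_bridge then PySem.Set.add s (q.2, p.2) else s))
    ↔ y ∈ s ∨ (pvACond node_layers node_morphisms node_invariants p q ∧ y = (q.2, p.2)) := by
  unfold pvACond
  split_ifs with h1 h2
  · simp [h1]
  · simp [h1, h2]
  · by_cases h3 : (((PySem.List.pyGetD node_morphisms q.1 "" != "") && (PySem.List.pyGetD node_morphisms p.1 "" != "") && (PySem.List.pyGetD node_morphisms q.1 "" == PySem.List.pyGetD node_morphisms p.1 "")) ||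
        ((PySem.List.pyGetD node_invariants q.1 "" != "") && (PySem.List.pyGetD node_invariants p.1 "" != "") && (PySem.List.pyGetD node_invariants q.1 "" == PySem.List.pyGetD node_invariants p.1 "")) ||
        ((pvLn (PySem.List.pyGetD node_layers p.1 "") - pvLn (PySem.List.pyGetD node_layers q.1 "")) == 1)) = true
    · simp only [h3, if_true, PySem.Set.mem_add]
      constructor
      · rintro (hy | rfl)
        · exact Or.inl hy
        · exact Or.inr ⟨⟨h1, h2, trivial⟩, rfl⟩
      · rintro (hy | ⟨_, rfl⟩)
        · exact Or.inl hy
        · exact Or.inr rfl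
    · simp only [Bool.not_eq_true] at h3
      simp [h3, h1, h2]

lemma pv_ACond_iff (node_ids node_layers node_morphisms node_invariants : List String)
    (i j : Nat) (hi : i < node_ids.length) (hj : j < node_ids.length) :
    pvACond node_layers node_morphisms node_invariants (0 + (i : Int), node_ids[i]) (0 + (j : Int), node_ids[j])
      ↔ pvCond node_ids node_layers node_morphisms node_invariants i j := by
  unfold pvACond pvCond
  rw [List.getD_eq_getElem _ _ hi, List.getD_eq_getElem _ _ hj]
  simp only [zero_add, PySem.List.pyGetD_natCast]
  generalize node_ids[i] = A
  generalize node_ids[j] = B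
  generalize pvLn (node_layers.getD i "") = Li
  generalize pvLn (node_layers.getD j "") = Lj
  generalize node_morphisms.getD i "" = Mi
  generalize node_morphisms.getD j "" = Mj
  generalize node_invariants.getD i "" = Vi
  generalize node_invariants.getD j "" = Vj
  simp only [beq_iff_eq, Bool.or_eq_true, Bool.and_eq_true, bne_iff_ne, ne_eq, not_le]
  constructor
  · rintro ⟨h1, h2, h3⟩
    refine ⟨fun hh => h1 hh.symm, h2, ?_⟩
    rcases h3 with (⟨⟨hm1, _⟩, hm3⟩ | ⟨⟨hv1, _⟩, hv3⟩) | hb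
    · exact Or.inl ⟨hm1, hm3⟩
    · exact Or.inr (Or.inl ⟨hv1, hv3⟩)
    · exact Or.inr (Or.inr hb)
  · rintro ⟨h1, h2, h3⟩
    refine ⟨fun hh => h1 hh.symm, h2, ?_⟩
    rcases h3 with ⟨hm1, hm3⟩ | ⟨hv1, hv3⟩ | hb
    · exact Or.inl (Or.inl ⟨⟨hm1, hm3 ▸ hm1⟩, hm3⟩)
    · exact Or.inl (Or.inr ⟨⟨hv1, hv3 ▸ hv1⟩, hv3⟩)
    · exact Or.inr hb

lemma pv_A_mem (node_ids node_layers node_morphisms node_invariants : List String)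
    (s0 : PySem.Set (String × String)) (y : String × String) :
    y ∈ (PySem.List.enumerate node_ids).foldl (fun out p =>
      (PySem.List.enumerate node_ids).foldl (fun out q =>
        if p.2 == q.2 then out
        else if pvLn (PySem.List.pyGetD node_layers q.1 "") ≥ pvLn (PySem.List.pyGetD node_layers p.1 "") then out
        else
          let same_m := (PySem.List.pyGetD node_morphisms q.1 "" != "") && (PySem.List.pyGetD node_morphisms p.1 "" != "") && (PySem.List.pyGetD node_morphisms q.1 "" == PySem.List.pyGetD node_morphisms p.1 "")
          let same_inv := (PySem.List.pyGetD node_invariants q.1 "" != "") && (PySem.List.pyGetD node_invariants p.1 "" != "") && (PySem.List.pyGetD node_invariants q.1 "" == PySem.List.pyGetD node_invariants p.1 "")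
          let prev_bridge := (pvLn (PySem.List.pyGetD node_layers p.1 "") - pvLn (PySem.List.pyGetD node_layers q.1 "")) == 1
          if same_m || same_inv || prev_bridge then PySem.Set.add out (q.2, p.2) else out)
        out) s0
    ↔ y ∈ s0 ∨ ∃ i, i < node_ids.length ∧ ∃ j, j < node_ids.length ∧
        pvCond node_ids node_layers node_morphisms node_invariants i j ∧
        y = (node_ids.getD j "", node_ids.getD i "") := by
  rw [pv_mem_foldl_step _ _
    (fun p y => ∃ q ∈ PySem.List.enumerate node_ids,
      pvACond node_layers node_morphisms node_invariants p q ∧ y = (q.2, p.2))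
    (fun s p y => pv_mem_foldl_step _ _
      (fun q y => pvACond node_layers node_morphisms node_invariants p q ∧ y = (q.2, p.2))
      (fun s q y => pv_A_step node_layers node_morphisms node_invariants p q s y) s y)]
  apply or_congr_right
  constructor
  · rintro ⟨p, hp, q, hq, hc, rfl⟩
    rw [PySem.List.mem_enumerate_iff] at hp hq
    obtain ⟨i, hi, rfl⟩ := hp
    obtain ⟨j, hj, rfl⟩ := hq
    rw [pv_ACond_iff _ _ _ _ i j hi hj] at hc
    exact ⟨i, hi, j, hj, hc, by rw [List.getD_eq_getElem _ _ hi, List.getD_eq_getElem _ _ hj]⟩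
  · rintro ⟨i, hi, j, hj, hc, rfl⟩
    refine ⟨(0 + (i : Int), node_ids[i]), ?_, (0 + (j : Int), node_ids[j]), ?_, ?_, ?_⟩
    · rw [PySem.List.mem_enumerate_iff]; exact ⟨i, hi, rfl⟩
    · rw [PySem.List.mem_enumerate_iff]; exact ⟨j, hj, rfl⟩
    · exact (pv_ACond_iff _ _ _ _ i j hi hj).mpr hc
    · rw [List.getD_eq_getElem _ _ hi, List.getD_eq_getElem _ _ hj]

lemma pv_group_getD {κ : Type} [BEq κ] [LawfulBEq κ] (pairs : List (κ × Nat)) (c : κ) :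
    (pvGroup pairs).getD c [] = (pairs.filter (fun p => p.1 == c)).map (fun p => p.2) := by
  unfold pvGroup
  rw [PySem.Dict.getD_foldl_modify_append]
  simp [pysem]

-- B-side: membership in the candidate list of node i
lemma pv_B_cands_mem (node_ids node_layers node_morphisms node_invariants : List String)
    (i j : Nat) :
    (j ∈ (pvGroup (((List.range node_ids.length).filter (fun k => node_morphisms.getD k "" != "")).map (fun k => (node_morphisms.getD k "", k)))).getD (node_morphisms.getD i "") []
        ++ (pvGroup (((List.range node_ids.length).filter (fun k => node_invariants.getD k "" != "")).map (fun k => (node_invariants.getD k "", k)))).getD (node_invariants.getD i "") []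
        ++ (pvGroup ((List.range node_ids.length).map (fun k => (((List.range node_ids.length).map (fun m => pvLn (node_layers.getD m ""))).getD k 0, k)))).getD (((List.range node_ids.length).map (fun m => pvLn (node_layers.getD m ""))).getD i 0 - 1) [])
    ↔ (j < node_ids.length ∧
        ((node_morphisms.getD j "" ≠ "" ∧ node_morphisms.getD j "" = node_morphisms.getD i "") ∨
         (node_invariants.getD j "" ≠ "" ∧ node_invariants.getD j "" = node_invariants.getD i "") ∨
         pvLn (node_layers.getD j "") = ((List.range node_ids.length).map (fun m => pvLn (node_layers.getD m ""))).getD i 0 - 1)) := by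
  simp only [List.mem_append, pv_group_getD, List.mem_map, List.mem_filter, List.mem_range,
    bne_iff_ne, beq_iff_eq, ne_eq]
  constructor
  · rintro ((⟨a, ⟨⟨k, ⟨hk, hne⟩, rfl⟩, hc⟩, rfl⟩ | ⟨a, ⟨⟨k, ⟨hk, hne⟩, rfl⟩, hc⟩, rfl⟩) | ⟨a, ⟨⟨k, hk, rfl⟩, hc⟩, rfl⟩)
    · exact ⟨hk, Or.inl ⟨hne, hc⟩⟩
    · exact ⟨hk, Or.inr (Or.inl ⟨hne, hc⟩)⟩
    · exact ⟨hk, Or.inr (Or.inr ((PySem.List.getD_map_range (fun m => pvLn (node_layers.getD m "")) _ _ 0 hk).symm.trans hc))⟩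
  · rintro ⟨hj, ⟨hne, hc⟩ | ⟨hne, hc⟩ | hc⟩
    · exact Or.inl (Or.inl ⟨(node_morphisms.getD j "", j), ⟨⟨j, ⟨hj, hne⟩, rfl⟩, hc⟩, rfl⟩)
    · exact Or.inl (Or.inr ⟨(node_invariants.getD j "", j), ⟨⟨j, ⟨hj, hne⟩, rfl⟩, hc⟩, rfl⟩)
    · exact Or.inr ⟨(((List.range node_ids.length).map (fun m => pvLn (node_layers.getD m ""))).getD j 0, j), ⟨⟨j, hj, rfl⟩, (PySem.List.getD_map_range (fun m => pvLn (node_layers.getD m "")) _ _ 0 hj).trans hc⟩, rfl⟩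

-- B's inner loop step
lemma pv_B_step (node_ids : List String) (lns : List Int) (i : Nat)
    (s : PySem.Set (String × String)) (j : Nat) (y : String × String) :
    (y ∈ (if lns.getD j 0 < lns.getD i 0 && node_ids.getD j "" != node_ids.getD i "" then
            PySem.Set.add s (node_ids.getD j "", node_ids.getD i "")
          else s))
    ↔ y ∈ s ∨ ((lns.getD j 0 < lns.getD i 0 ∧ node_ids.getD j "" ≠ node_ids.getD i "") ∧
               y = (node_ids.getD j "", node_ids.getD i "")) := by
  split_ifs with h1
  · simp only [Bool.and_eq_true, decide_eq_true_eq, bne_iff_ne, ne_eq] at h1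
    rw [PySem.Set.mem_add]
    constructor
    · rintro (hy | rfl)
      · exact Or.inl hy
      · exact Or.inr ⟨h1, rfl⟩
    · rintro (hy | ⟨_, rfl⟩)
      · exact Or.inl hy
      · exact Or.inr rfl
  · simp only [Bool.and_eq_true, decide_eq_true_eq, bne_iff_ne, ne_eq] at h1
    constructor
    · exact Or.inl
    · rintro (hy | ⟨hc, rfl⟩)
      · exact hy
      · exact absurd hc h1

set_option maxHeartbeats 800000 in
lemma pv_B_mem (node_ids node_layers node_morphisms node_invariants : List String)
    (s0 : PySem.Set (String × String)) (y : String × String) :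
    y ∈ (List.range node_ids.length).foldl (fun out i =>
      ((pvGroup (((List.range node_ids.length).filter (fun k => node_morphisms.getD k "" != "")).map (fun k => (node_morphisms.getD k "", k)))).getD (node_morphisms.getD i "") []
        ++ (pvGroup (((List.range node_ids.length).filter (fun k => node_invariants.getD k "" != "")).map (fun k => (node_invariants.getD k "", k)))).getD (node_invariants.getD i "") []
        ++ (pvGroup ((List.range node_ids.length).map (fun k => (((List.range node_ids.length).map (fun m => pvLn (node_layers.getD m ""))).getD k 0, k)))).getD (((List.range node_ids.length).map (fun m => pvLn (node_layers.getD m ""))).getD i 0 - 1) []).foldl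
        (fun out j =>
          if ((List.range node_ids.length).map (fun m => pvLn (node_layers.getD m ""))).getD j 0 < ((List.range node_ids.length).map (fun m => pvLn (node_layers.getD m ""))).getD i 0 && node_ids.getD j "" != node_ids.getD i "" then
            PySem.Set.add out (node_ids.getD j "", node_ids.getD i "")
          else out)
        out) s0
    ↔ y ∈ s0 ∨ ∃ i, i < node_ids.length ∧ ∃ j, j < node_ids.length ∧
        pvCond node_ids node_layers node_morphisms node_invariants i j ∧
        y = (node_ids.getD j "", node_ids.getD i "") := by
  rw [pv_mem_foldl_step _ _
    (fun i y => ∃ j ∈ ((pvGroup (((List.range node_ids.length).filter (fun k => node_morphisms.getD k "" != "")).map (fun k => (node_morphisms.getD k "", k)))).getD (node_morphisms.getD i "") []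
        ++ (pvGroup (((List.range node_ids.length).filter (fun k => node_invariants.getD k "" != "")).map (fun k => (node_invariants.getD k "", k)))).getD (node_invariants.getD i "") []
        ++ (pvGroup ((List.range node_ids.length).map (fun k => (((List.range node_ids.length).map (fun m => pvLn (node_layers.getD m ""))).getD k 0, k)))).getD (((List.range node_ids.length).map (fun m => pvLn (node_layers.getD m ""))).getD i 0 - 1) []),
      (((List.range node_ids.length).map (fun m => pvLn (node_layers.getD m ""))).getD j 0 < ((List.range node_ids.length).map (fun m => pvLn (node_layers.getD m ""))).getD i 0 ∧ node_ids.getD j "" ≠ node_ids.getD i "") ∧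
      y = (node_ids.getD j "", node_ids.getD i ""))
    (fun s i y => pv_mem_foldl_step _ _
      (fun j y => (((List.range node_ids.length).map (fun m => pvLn (node_layers.getD m ""))).getD j 0 < ((List.range node_ids.length).map (fun m => pvLn (node_layers.getD m ""))).getD i 0 ∧ node_ids.getD j "" ≠ node_ids.getD i "") ∧ y = (node_ids.getD j "", node_ids.getD i ""))
      (fun s j y => pv_B_step node_ids ((List.range node_ids.length).map (fun m => pvLn (node_layers.getD m ""))) i s j y) s y)]
  apply or_congr_right
  constructor
  · rintro ⟨i, hi, j, hj, ⟨hlt, hne⟩, rfl⟩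
    rw [List.mem_range] at hi
    rw [pv_B_cands_mem node_ids node_layers node_morphisms node_invariants i j] at hj
    obtain ⟨hjn, hdisj⟩ := hj
    rw [PySem.List.getD_map_range (fun m => pvLn (node_layers.getD m "")) _ _ 0 hi,
        PySem.List.getD_map_range (fun m => pvLn (node_layers.getD m "")) _ _ 0 hjn] at hlt
    refine ⟨i, hi, j, hjn, ⟨hne, hlt, ?_⟩, rfl⟩
    rcases hdisj with hm | hv | hb
    · exact Or.inl hm
    · exact Or.inr (Or.inl hv)
    · rw [PySem.List.getD_map_range (fun m => pvLn (node_layers.getD m "")) _ _ 0 hi] at hb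
      exact Or.inr (Or.inr (by omega))
  · rintro ⟨i, hi, j, hj, ⟨hne, hlt, hdisj⟩, rfl⟩
    refine ⟨i, List.mem_range.mpr hi, j, ?_, ⟨?_, hne⟩, rfl⟩
    · rw [pv_B_cands_mem node_ids node_layers node_morphisms node_invariants i j]
      refine ⟨hj, ?_⟩
      rcases hdisj with hm | hv | hb
      · exact Or.inl hm
      · exact Or.inr (Or.inl hv)
      · refine Or.inr (Or.inr ?_)
        rw [PySem.List.getD_map_range (fun m => pvLn (node_layers.getD m "")) _ _ 0 hi]
        omega
    · rw [PySem.List.getD_map_range (fun m => pvLn (node_layers.getD m "")) _ _ 0 hi,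
          PySem.List.getD_map_range (fun m => pvLn (node_layers.getD m "")) _ _ 0 hj]
      exact hlt

-- ===== VERDICT (by name: the statement is the Claim_ definition above) =====
theorem py_dense_dependency_edges_py_spec : Claim_equal_py_dense_dependency_edges_py := by
  intro node_ids node_layers node_morphisms node_invariants explicit_edges _ _
  unfold Spec_py_dense_dependency_edges_py
  simp only [py_dense_dependency_edges_py, py_dense_dependency_edges_py_alt]
  apply pv_sorted2_eq
  · apply pv_nodup_foldl_step
    · intro s p hs
      apply pv_nodup_foldl_step
      · intro s q hs
        split_ifs with h1 h2 h3
        · exact hs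
        · exact hs
        · exact PySem.Set.nodup_add _ _ hs
        · exact hs
      · exact hs
    · apply pv_nodup_foldl_step
      · intro s e hs
        exact pv_nodup_ite _ _ _ hs
      · exact List.nodup_nil
  · apply pv_nodup_foldl_step
    · intro s i hs
      apply pv_nodup_foldl_step
      · intro s j hs
        exact pv_nodup_ite _ _ _ hs
      · exact hs
    · apply pv_nodup_foldl_step
      · intro s e hs
        exact pv_nodup_ite _ _ _ hs
      · exact List.nodup_nil
  · intro x
    rw [pv_A_mem, pv_B_mem]
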